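-- pv_equiv track=rewrite | github.com/jstout211/enigma_MEG | enigmeg/QA/ImageSelectorGui.py | get_last_review
-- ===== SOURCE A (Python) =====
-- def get_last_review(history_log):
--     '''Extract the start and stop of the last review
--     Return the log lines from the last review'''
--     rev_start_idx=0
--     rev_end_idx=0
--     for idx, line in enumerate(history_log):
--         cond=line.split('INFO:')[-1]
--         if cond=='REVIEW_START':
--             rev_start_idx=idx
--         elif cond=='REVIEW_FINISH':
--             rev_end_idx=idx
--     last_review=history_log[rev_start_idx+1:rev_end_idx]
--     return last_review
-- ===== SOURCE B (Python) =====
-- def get_last_review(history_log):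
--     '''Extract the start and stop of the last review
--     Return the log lines from the last review'''
--     rev_start_idx = 0
--     rev_end_idx = 0
--     found_start = False
--     found_end = False
--     for idx in range(len(history_log) - 1, -1, -1):
--         cond = history_log[idx].split('INFO:')[-1]
--         if not found_start and cond == 'REVIEW_START':
--             rev_start_idx = idx
--             found_start = True
--         if not found_end and cond == 'REVIEW_FINISH':
--             rev_end_idx = idx
--             found_end = True
--         if found_start and found_end:
--             break
--     return history_log[rev_start_idx + 1:rev_end_idx]
-- ===== Notes on version B (the rewrite author's own statement) =====
-- stated objective: alternative
-- what changed: B scans the log backwards, records each marker's first hit from the end (its last occurrence overall) and breaks early once both markers are found, instead of A's full forward pass that keeps overwriting both indices.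
import Mathlib
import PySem

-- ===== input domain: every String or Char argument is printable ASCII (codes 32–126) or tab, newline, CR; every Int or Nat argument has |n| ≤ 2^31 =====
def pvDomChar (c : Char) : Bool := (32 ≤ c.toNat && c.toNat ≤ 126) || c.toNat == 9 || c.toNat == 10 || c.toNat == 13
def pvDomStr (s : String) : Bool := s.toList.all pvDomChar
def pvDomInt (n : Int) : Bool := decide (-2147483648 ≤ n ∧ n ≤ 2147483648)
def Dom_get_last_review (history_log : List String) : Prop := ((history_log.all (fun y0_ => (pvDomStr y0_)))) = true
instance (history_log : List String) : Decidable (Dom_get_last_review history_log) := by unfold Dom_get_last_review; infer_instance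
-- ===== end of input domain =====

-- B scans the log backwards with early exit once both review markers are found,
-- instead of A's full forward pass overwriting both indices (objective: alternative decomposition).


-- ===== PORT A =====
-- line.split('INFO:')[-1]  (split? is some: the separator is non-empty; [-1] always exists: a split is non-empty)
def pvCond (line : String) : String :=
  (PySem.List.pyGet? ((PySem.Str.split? line "INFO:").getD []) (-1)).getD ""

def get_last_review (history_log : List String) : List String :=
  let st := (PySem.List.enumerate history_log).foldl
    (fun (acc : Int × Int) p =>
      let cond := pvCond p.2
      if cond = "REVIEW_START" then (p.1, acc.2)
      else if cond = "REVIEW_FINISH" then (acc.1, p.1)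
      else acc) (0, 0)
  PySem.List.slice history_log (some (st.1 + 1)) (some st.2)

-- ===== PORT B =====
-- backward scan: Option Int encodes Source B's (found flag, index) pair; early return = Source B's break
def pvScanBack : List (Int × String) → Option Int → Option Int → Option Int × Option Int
  | [], s, e => (s, e)
  | (i, line) :: rest, s, e =>
    let cond := pvCond line
    let s' := if s = none ∧ cond = "REVIEW_START" then some i else s
    let e' := if e = none ∧ cond = "REVIEW_FINISH" then some i else e
    if s'.isSome ∧ e'.isSome then (s', e') else pvScanBack rest s' e'

def get_last_review_alt (history_log : List String) : List String :=
  let r := pvScanBack (PySem.List.enumerate history_log).reverse none none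
  PySem.List.slice history_log (some (r.1.getD 0 + 1)) (some (r.2.getD 0))

-- ===== PRECONDITION & SPEC =====
def Spec_get_last_review (history_log : List String) (out : List String) : Prop := out = get_last_review_alt history_log
instance (history_log : List String) (out : List String) : Decidable (Spec_get_last_review history_log out) := by unfold Spec_get_last_review; infer_instance

-- ===== CLAIM (what is proved, stated in full; the proofs are below) =====
def Claim_equal_get_last_review : Prop := ∀ (history_log : List String), Dom_get_last_review history_log → Spec_get_last_review history_log (get_last_review history_log)

-- ===== LEMMAS AND PROOFS =====

-- option "first some wins" (proof-side only)
def pvOor : Option Int → Option Int → Option Int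
  | some x, _ => some x
  | none, b => b

theorem pvOor_none_right (a : Option Int) : pvOor a none = a := by cases a <;> rfl

theorem pvOor_assoc (a b c : Option Int) : pvOor (pvOor a b) c = pvOor a (pvOor b c) := by
  cases a <;> rfl

def pvCur1 (p : Int × String) : Option Int := if pvCond p.2 = "REVIEW_START" then some p.1 else none
def pvCur2 (p : Int × String) : Option Int := if pvCond p.2 = "REVIEW_FINISH" then some p.1 else none

-- rightmost match of each marker
def pvHR : List (Int × String) → Option Int × Option Int
  | [] => (none, none)
  | p :: t => (pvOor (pvHR t).1 (pvCur1 p), pvOor (pvHR t).2 (pvCur2 p))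

-- leftmost match of each marker
def pvHL : List (Int × String) → Option Int × Option Int
  | [] => (none, none)
  | p :: t => (pvOor (pvCur1 p) (pvHL t).1, pvOor (pvCur2 p) (pvHL t).2)

theorem pvHL_append_single (u : List (Int × String)) (p : Int × String) :
    pvHL (u ++ [p]) = (pvOor (pvHL u).1 (pvCur1 p), pvOor (pvHL u).2 (pvCur2 p)) := by
  induction u with
  | nil => cases h1 : pvCur1 p <;> cases h2 : pvCur2 p <;> simp [pvHL, pvOor, h1, h2]
  | cons q t ih => simp [pvHL, ih, pvOor_assoc]

theorem pvHL_reverse (m : List (Int × String)) : pvHL m.reverse = pvHR m := by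
  induction m with
  | nil => rfl
  | cons p t ih => simp [List.reverse_cons, pvHL_append_single, ih, pvHR]

theorem pvScanBack_eq (m : List (Int × String)) :
    ∀ s e, pvScanBack m s e = (pvOor s (pvHL m).1, pvOor e (pvHL m).2) := by
  induction m with
  | nil => intro s e; simp [pvScanBack, pvHL, pvOor_none_right]
  | cons p t ih =>
    intro s e
    have hs : (if s = none ∧ pvCond p.2 = "REVIEW_START" then some p.1 else s)
        = pvOor s (pvCur1 p) := by
      cases s <;> simp [pvOor, pvCur1]
    have he : (if e = none ∧ pvCond p.2 = "REVIEW_FINISH" then some p.1 else e)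
        = pvOor e (pvCur2 p) := by
      cases e <;> simp [pvOor, pvCur2]
    show (let cond := pvCond p.2; _) = _
    simp only [pvScanBack, hs, he, pvHL]
    rw [← pvOor_assoc, ← pvOor_assoc]
    split_ifs with h
    · obtain ⟨h1, h2⟩ := h
      cases h1' : pvOor s (pvCur1 p) <;> cases h2' : pvOor e (pvCur2 p) <;>
        simp_all [pvOor]
    · exact ih _ _

theorem pvFoldA_eq (l : List (Int × String)) :
    ∀ s e : Int, l.foldl
      (fun (acc : Int × Int) p =>
        let cond := pvCond p.2
        if cond = "REVIEW_START" then (p.1, acc.2)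
        else if cond = "REVIEW_FINISH" then (acc.1, p.1)
        else acc) (s, e)
      = ((pvHR l).1.getD s, (pvHR l).2.getD e) := by
  induction l with
  | nil => intro s e; simp [pvHR]
  | cons p t ih =>
    intro s e
    simp only [List.foldl_cons, pvHR]
    by_cases h1 : pvCond p.2 = "REVIEW_START"
    · simp only [h1, ih]
      cases (pvHR t).1 <;> cases (pvHR t).2 <;> simp [pvOor, pvCur1, pvCur2, h1]
    · by_cases h2 : pvCond p.2 = "REVIEW_FINISH"
      · simp only [h2, ih]
        cases (pvHR t).1 <;> cases (pvHR t).2 <;> simp [pvOor, pvCur1, pvCur2, h2]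
      · simp only [h1, h2, ih]
        cases (pvHR t).1 <;> cases (pvHR t).2 <;> simp [pvOor, pvCur1, pvCur2, h1, h2]

-- ===== VERDICT (by name: the statement is the Claim_ definition above) =====
theorem get_last_review_spec : Claim_equal_get_last_review := by
  intro history_log _
  unfold Spec_get_last_review get_last_review get_last_review_alt
  rw [pvScanBack_eq, pvHL_reverse, pvFoldA_eq]
  rfl
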